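-- pv_equiv track=rewrite | github.com/umanlp/babeledits | utils.py | rename_key
-- ===== SOURCE A (Python) =====
-- def rename_key(d, old_key, new_key):
--     # Check if the old key exists in the dictionary
--     if old_key not in d:
--         raise KeyError(f"Key '{old_key}' not found in dictionary.")
--
--     # Convert the dictionary to a list of tuples (key, value)
--     items = list(d.items())
--
--     # Find the index of the old key
--     index = next(i for i, (k, v) in enumerate(items) if k == old_key)
--
--     # Replace the old key with the new key in the list
--     items[index] = (new_key, items[index][1])
--
--     # Create a new dictionary from the modified list
--     new_dict = dict(items)
--
--     return new_dict
-- ===== SOURCE B (Python) =====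
-- def rename_key(d, old_key, new_key):
--     # Same missing-key guard (identical exception) as the original.
--     if old_key not in d:
--         raise KeyError(f"Key '{old_key}' not found in dictionary.")
--     # Single pass: decide each output key inline while copying into a fresh dict,
--     # instead of materializing items, scanning for the index, mutating a slot and rebuilding.
--     out = {}
--     for k, v in d.items():
--         out[new_key if k == old_key else k] = v
--     return out
-- ===== Notes on version B (the rewrite author's own statement) =====
-- stated objective: simpler
-- what changed: Replaces A's list-materialize / next()-scan-for-index / slot-mutate / dict(items)-rebuild sequence with one traversal that maps each key inline while populating a fresh dict.
import Mathlib
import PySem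

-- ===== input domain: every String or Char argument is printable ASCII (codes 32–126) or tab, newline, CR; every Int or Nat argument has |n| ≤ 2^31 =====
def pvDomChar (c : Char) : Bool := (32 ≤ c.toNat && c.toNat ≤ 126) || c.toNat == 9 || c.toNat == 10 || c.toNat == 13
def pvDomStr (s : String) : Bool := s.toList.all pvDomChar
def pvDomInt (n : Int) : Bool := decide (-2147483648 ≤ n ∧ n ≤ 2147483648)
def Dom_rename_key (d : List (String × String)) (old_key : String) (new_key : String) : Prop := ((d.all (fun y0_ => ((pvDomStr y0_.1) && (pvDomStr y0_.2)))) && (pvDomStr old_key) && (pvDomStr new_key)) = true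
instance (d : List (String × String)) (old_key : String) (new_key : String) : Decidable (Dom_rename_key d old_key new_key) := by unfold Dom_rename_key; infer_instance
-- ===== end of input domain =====

-- B replaces A's materialize-list / scan-for-index / mutate-slot / rebuild-dict sequence with a
-- single pass that maps each key inline into a fresh dict (simpler decomposition, same cost).

-- ===== PORT A =====
def rename_key (d : List (String × String)) (old_key : String) (new_key : String) : List (String × String) :=
  -- 'if old_key not in d: raise KeyError(...)' — Python raises here; excluded by Pre_rename_key
  if (PySem.Dict.mk d).contains old_key = false then []
  else
    -- items = list(d.items())
    let items := d
    -- index = next(i for i, (k, v) in enumerate(items) if k == old_key)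
    let index := items.findIdx (fun p => p.1 == old_key)
    -- items[index] = (new_key, items[index][1]); index is always in range under the guard,
    -- so List.getD with a dummy default is exact here
    let items' := items.set index (new_key, (items.getD index ("", "")).2)
    -- return dict(items)
    (items'.foldl (fun acc p => acc.insert p.1 p.2) PySem.Dict.empty).items

-- ===== PORT B =====
def rename_key_alt (d : List (String × String)) (old_key : String) (new_key : String) : List (String × String) :=
  -- same guard: 'if old_key not in d: raise KeyError(...)' — excluded by Pre_rename_key
  if (PySem.Dict.mk d).contains old_key = false then []
  else
    -- out = {}; for k, v in d.items(): out[new_key if k == old_key else k] = v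
    (d.foldl (fun acc p => acc.insert (if p.1 == old_key then new_key else p.1) p.2)
      PySem.Dict.empty).items

-- ===== PRECONDITION & SPEC =====
-- Pre_ excludes exactly the inputs where both Pythons raise KeyError (old_key absent); the Nodup
-- conjunct only restates the dict representation invariant (a Python dict has distinct keys).
def Pre_rename_key (d : List (String × String)) (old_key : String) (new_key : String) : Prop :=
  old_key ∈ d.map Prod.fst ∧ (d.map Prod.fst).Nodup
instance (d : List (String × String)) (old_key : String) (new_key : String) : Decidable (Pre_rename_key d old_key new_key) := by unfold Pre_rename_key; infer_instance
def pvWitness_rename_key : (List (String × String)) × String × String :=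
  ([("a", "1"), ("b", "2")], "a", "c")

def Spec_rename_key (d : List (String × String)) (old_key : String) (new_key : String) (out : List (String × String)) : Prop := out = rename_key_alt d old_key new_key
instance (d : List (String × String)) (old_key : String) (new_key : String) (out : List (String × String)) : Decidable (Spec_rename_key d old_key new_key out) := by unfold Spec_rename_key; infer_instance

-- ===== CLAIM (what is proved, stated in full; the proofs are below) =====
def Claim_equal_rename_key : Prop := ∀ (d : List (String × String)) (old_key : String) (new_key : String), Dom_rename_key d old_key new_key → Pre_rename_key d old_key new_key → Spec_rename_key d old_key new_key (rename_key d old_key new_key)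

-- ===== LEMMAS AND PROOFS =====

-- A list with no occurrence of old_key among its keys is unchanged by B's key-mapping.
theorem map_rename_id (ok nk : String) :
    ∀ (l : List (String × String)), ok ∉ l.map Prod.fst →
      l.map (fun p => ((if p.1 == ok then nk else p.1), p.2)) = l := by
  intro l
  induction l with
  | nil => intro _; rfl
  | cons h t ih =>
    intro hmem
    simp only [List.map_cons, List.mem_cons, not_or] at hmem
    have hne' : ¬ h.1 = ok := fun e => hmem.1 e.symm
    simp only [List.map_cons, List.cons.injEq]
    refine ⟨by simp [hne'], ?_⟩
    simpa using ih hmem.2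

-- Under the dict invariant, A's set-at-found-index list equals B's mapped list.
theorem set_eq_map (ok nk : String) :
    ∀ (d : List (String × String)), (d.map Prod.fst).Nodup → ok ∈ d.map Prod.fst →
      d.set (d.findIdx (fun p => p.1 == ok))
        (nk, (d.getD (d.findIdx (fun p => p.1 == ok)) ("", "")).2)
      = d.map (fun p => ((if p.1 == ok then nk else p.1), p.2)) := by
  intro d
  induction d with
  | nil => intro _ hmem; simp at hmem
  | cons h t ih =>
    intro hnd hmem
    simp only [List.map_cons, List.nodup_cons] at hnd
    by_cases hk : h.1 = ok
    · have hb : (h.1 == ok) = true := by simp [hk]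
      simp only [List.findIdx_cons, hb, cond_true, List.set_cons_zero, List.getD,
        List.getElem?_cons_zero, Option.getD_some, List.map_cons, List.cons.injEq]
      have hnot : ok ∉ t.map Prod.fst := hk ▸ hnd.1
      refine ⟨by simp, ?_⟩
      simpa using (map_rename_id ok nk t hnot).symm
    · have hb : (h.1 == ok) = false := by simp [hk]
      have hmem' : ok ∈ t.map Prod.fst := by
        simp only [List.map_cons, List.mem_cons] at hmem
        rcases hmem with e | m
        · exact absurd e.symm hk
        · exact m
      simp only [List.findIdx_cons, hb, cond_false, List.set_cons_succ, List.map_cons,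
        List.cons.injEq, List.getD, List.getElem?_cons_succ]
      refine ⟨by simp, ?_⟩
      simpa [List.getD] using ih hnd.2 hmem'

-- ===== VERDICT (by name: the statement is the Claim_ definition above) =====
theorem rename_key_spec : Claim_equal_rename_key := by
  intro d ok nk _ hpre
  obtain ⟨hmem, hnd⟩ := hpre
  unfold Spec_rename_key rename_key rename_key_alt
  have hc : (PySem.Dict.mk d).contains ok = true := by
    rw [PySem.Dict.contains_iff_mem_keys]
    simpa [PySem.Dict.keys] using hmem
  rw [hc]
  simp only [Bool.true_eq_false, if_false]
  rw [set_eq_map ok nk d hnd hmem, List.foldl_map]
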